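-- pv_equiv track=rewrite | github.com/rrm3/forge | backend/agent/wrapup_context.py | questions_to_ask
-- ===== SOURCE A (Python) =====
-- def questions_to_ask(config: list[dict], answers: list[dict]) -> list[dict]:
--     """Return the pulse questions that still need answers at the current version.
--
--     A question is "already answered" when the user's log has at least one
--     record with a matching ``(question_id, version)`` pair. Malformed records
--     in the log are ignored (a user should not be blocked from being asked
--     because of a corrupt row written by some future version of the app).
--     """
--     answered: set[tuple[str, str]] = set()
--     for record in answers or []:
--         if not isinstance(record, dict):
--             continue
--         qid = record.get("question_id")
--         ver = record.get("version")
--         if isinstance(qid, str) and isinstance(ver, str):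
--             answered.add((qid, ver))
--
--     remaining: list[dict] = []
--     for question in config or []:
--         if not isinstance(question, dict):
--             continue
--         qid = question.get("id")
--         ver = question.get("version")
--         if not isinstance(qid, str) or not isinstance(ver, str):
--             continue
--         if (qid, ver) in answered:
--             continue
--         remaining.append(question)
--     return remaining
-- ===== SOURCE B (Python) =====
-- def questions_to_ask(config: list[dict], answers: list[dict]) -> list[dict]:
--     def unanswered(question):
--         if not isinstance(question, dict):
--             return False
--         qid = question.get("id")
--         ver = question.get("version")
--         if not isinstance(qid, str) or not isinstance(ver, str):
--             return False
--         return not any(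
--             isinstance(r, dict)
--             and r.get("question_id") == qid
--             and r.get("version") == ver
--             for r in answers or []
--         )
--     return [q for q in config or [] if unanswered(q)]
-- ===== Notes on version B (the rewrite author's own statement) =====
-- stated objective: simpler
-- what changed: Drops the precomputed answered-pairs set: B is a single filter over config whose predicate scans answers directly with any(), matching records by equality of question_id/version (which subsumes A's str checks on the record since the question's fields are already str).
import Mathlib
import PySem

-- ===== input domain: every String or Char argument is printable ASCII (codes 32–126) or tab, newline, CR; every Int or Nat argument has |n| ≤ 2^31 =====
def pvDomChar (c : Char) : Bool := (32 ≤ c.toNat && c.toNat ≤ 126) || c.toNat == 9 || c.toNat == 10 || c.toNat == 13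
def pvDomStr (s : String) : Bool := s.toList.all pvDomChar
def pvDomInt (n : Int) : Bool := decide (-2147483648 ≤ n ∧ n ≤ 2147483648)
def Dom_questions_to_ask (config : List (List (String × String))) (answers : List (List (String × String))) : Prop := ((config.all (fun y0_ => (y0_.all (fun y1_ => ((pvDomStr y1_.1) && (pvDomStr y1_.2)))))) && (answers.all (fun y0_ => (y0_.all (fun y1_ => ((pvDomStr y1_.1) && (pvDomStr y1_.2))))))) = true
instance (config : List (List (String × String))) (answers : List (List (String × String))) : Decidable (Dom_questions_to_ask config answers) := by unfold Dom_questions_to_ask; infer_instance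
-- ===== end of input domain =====

-- B replaces A's precomputed answered-pairs set by a direct filter over config whose
-- predicate scans `answers` with any() (objective: simpler; return value only, no mutation).

-- ===== PORT A =====
-- dict.get(k): first matching key in the association list (the convention's lookup)
def dictGetStr (d : List (String × String)) (k : String) : Option String :=
  (d.find? (fun p => p.1 == k)).map (·.2)

-- Under the type convention every record IS a dict of str→str, so Python's
-- `isinstance(record, dict)` / `isinstance(_, str)` guards reduce to the
-- Option pattern-match on the dict lookups (none = missing key).
def questions_to_ask (config : List (List (String × String))) (answers : List (List (String × String))) : List (List (String × String)) :=
  let answered : PySem.Set (String × String) :=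
    answers.foldl (fun s record =>
      match dictGetStr record "question_id", dictGetStr record "version" with
      | some qid, some ver => PySem.Set.add s (qid, ver)
      | _, _ => s) PySem.Set.empty
  config.foldl (fun remaining question =>
    match dictGetStr question "id", dictGetStr question "version" with
    | some qid, some ver =>
        if PySem.Set.contains answered (qid, ver) then remaining
        else remaining ++ [question]
    | _, _ => remaining) []

-- ===== PORT B =====
-- B's own dict.get(k): first matching key in the association list
def qtaGet : List (String × String) → String → Option String
  | [], _ => none
  | p :: rest, k => if p.1 == k then some p.2 else qtaGet rest k

def qta_unanswered (answers : List (List (String × String))) (question : List (String × String)) : Bool :=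
  ((qtaGet question "id").bind (fun qid =>
    (qtaGet question "version").map (fun ver =>
      !(answers.any (fun r =>
          qtaGet r "question_id" == some qid && qtaGet r "version" == some ver))))).getD false

def questions_to_ask_alt (config : List (List (String × String))) (answers : List (List (String × String))) : List (List (String × String)) :=
  config.filter (qta_unanswered answers)

-- ===== PRECONDITION & SPEC =====
def Spec_questions_to_ask (config : List (List (String × String))) (answers : List (List (String × String))) (out : List (List (String × String))) : Prop := out = questions_to_ask_alt config answers
instance (config : List (List (String × String))) (answers : List (List (String × String))) (out : List (List (String × String))) : Decidable (Spec_questions_to_ask config answers out) := by unfold Spec_questions_to_ask; infer_instance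

-- ===== CLAIM (what is proved, stated in full; the proofs are below) =====
def Claim_equal_questions_to_ask : Prop := ∀ (config : List (List (String × String))) (answers : List (List (String × String))), Dom_questions_to_ask config answers → Spec_questions_to_ask config answers (questions_to_ask config answers)

-- ===== LEMMAS AND PROOFS =====

-- the two lookup helpers agree
theorem qtaGet_eq : qtaGet = dictGetStr := by
  funext d k
  induction d with
  | nil => rfl
  | cons p rest ih =>
    cases h : p.1 == k <;> simp [qtaGet, dictGetStr, h, ih]

-- membership in A's answered set = B's inner scan over `answers`
theorem qta_contains_foldl (l : List (List (String × String))) (s : PySem.Set (String × String))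
    (qid ver : String) :
    PySem.Set.contains
      (l.foldl (fun s record =>
        match dictGetStr record "question_id", dictGetStr record "version" with
        | some q, some v => PySem.Set.add s (q, v)
        | _, _ => s) s) (qid, ver)
    = (PySem.Set.contains s (qid, ver) ||
        l.any (fun r =>
          dictGetStr r "question_id" == some qid && dictGetStr r "version" == some ver)) := by
  induction l generalizing s with
  | nil => simp
  | cons r l ih =>
    simp only [List.foldl_cons, List.any_cons]
    cases hq : dictGetStr r "question_id" <;> cases hv : dictGetStr r "version"
    · rw [ih]; simp
    · rw [ih]; simp
    · rw [ih]; simp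
    · rename_i q v
      rw [ih]
      rw [Bool.eq_iff_iff]
      simp only [Bool.or_eq_true, Bool.and_eq_true, beq_iff_eq, Option.some.injEq,
        PySem.Set.contains_iff, PySem.Set.mem_add, Prod.mk.injEq]
      constructor
      · rintro (((h1 | ⟨rfl, rfl⟩) | h2))
        · exact Or.inl h1
        · exact Or.inr (Or.inl ⟨rfl, rfl⟩)
        · exact Or.inr (Or.inr h2)
      · rintro ((h1 | (⟨rfl, rfl⟩ | h2)))
        · exact Or.inl (Or.inl h1)
        · exact Or.inl (Or.inr ⟨rfl, rfl⟩)
        · exact Or.inr h2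

-- A's loop body = "append iff B's predicate holds"
theorem qta_step_eq (answers : List (List (String × String)))
    (remaining : List (List (String × String))) (question : List (String × String)) :
    (match dictGetStr question "id", dictGetStr question "version" with
      | some qid, some ver =>
          if PySem.Set.contains
              (answers.foldl (fun s record =>
                match dictGetStr record "question_id", dictGetStr record "version" with
                | some q, some v => PySem.Set.add s (q, v)
                | _, _ => s) PySem.Set.empty) (qid, ver) then remaining
          else remaining ++ [question]
      | _, _ => remaining)
    = (if qta_unanswered answers question then remaining ++ [question] else remaining) := by
  unfold qta_unanswered
  rw [qtaGet_eq]
  cases hq : dictGetStr question "id" <;> cases hv : dictGetStr question "version"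
  · simp
  · simp
  · simp
  · rename_i qid ver
    dsimp only
    rw [qta_contains_foldl]
    have hempty : PySem.Set.empty.contains (qid, ver) = false := rfl
    rw [hempty, Bool.false_or]
    by_cases hA : (answers.any (fun r =>
        dictGetStr r "question_id" == some qid && dictGetStr r "version" == some ver)) = true <;>
      simp [hA]

-- the whole loop, via foldl_congr_mem
theorem qta_foldl_eq (answers config : List (List (String × String)))
    (acc : List (List (String × String))) :
    config.foldl (fun remaining question =>
      match dictGetStr question "id", dictGetStr question "version" with
      | some qid, some ver =>
          if PySem.Set.contains
              (answers.foldl (fun s record =>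
                match dictGetStr record "question_id", dictGetStr record "version" with
                | some qid, some ver => PySem.Set.add s (qid, ver)
                | _, _ => s) PySem.Set.empty) (qid, ver) then remaining
          else remaining ++ [question]
      | _, _ => remaining) acc
    = config.foldl (fun remaining question =>
        if qta_unanswered answers question then remaining ++ [question] else remaining) acc :=
  PySem.List.foldl_congr_mem _ _ _ acc (fun acc x _ => qta_step_eq answers acc x)

-- ===== VERDICT (by name: the statement is the Claim_ definition above) =====
theorem questions_to_ask_spec : Claim_equal_questions_to_ask := by
  intro config answers _
  unfold Spec_questions_to_ask questions_to_ask questions_to_ask_alt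
  rw [qta_foldl_eq, PySem.List.foldl_append_if_eq_filter]
  simp
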